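-- pv_equiv track=rewrite | github.com/IuryB4rbos4/AlgoritmosEscalonamentoI-O | SSTF.py | sptf
-- ===== SOURCE A (Python) =====
-- def sptf(current_position, requests):
--     total_seek_time = 0
--     current_track = current_position
--     sorted_requests = sorted(requests)
--     track_sequence = [current_position]
--
--     while sorted_requests:
--         next_request = sorted_requests.pop(0)
--         total_seek_time += abs(next_request - current_track)
--         current_track = next_request
--         track_sequence.append(current_track)
--
--     return total_seek_time, track_sequence
-- ===== SOURCE B (Python) =====
-- def sptf(current_position, requests):
--     s = sorted(requests)
--     if not s:
--         return 0, [current_position]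
--     total = abs(s[0] - current_position) + (s[-1] - s[0])
--     return total, [current_position] + s
-- ===== Notes on version B (the rewrite author's own statement) =====
-- stated objective: faster
-- what changed: Replaces the quadratic pop(0) loop over the sorted list by a closed form: sort once, then total = |first - current| + (last - first) by telescoping of an ascending walk, and the sequence is just [current] + sorted list.
import Mathlib
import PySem

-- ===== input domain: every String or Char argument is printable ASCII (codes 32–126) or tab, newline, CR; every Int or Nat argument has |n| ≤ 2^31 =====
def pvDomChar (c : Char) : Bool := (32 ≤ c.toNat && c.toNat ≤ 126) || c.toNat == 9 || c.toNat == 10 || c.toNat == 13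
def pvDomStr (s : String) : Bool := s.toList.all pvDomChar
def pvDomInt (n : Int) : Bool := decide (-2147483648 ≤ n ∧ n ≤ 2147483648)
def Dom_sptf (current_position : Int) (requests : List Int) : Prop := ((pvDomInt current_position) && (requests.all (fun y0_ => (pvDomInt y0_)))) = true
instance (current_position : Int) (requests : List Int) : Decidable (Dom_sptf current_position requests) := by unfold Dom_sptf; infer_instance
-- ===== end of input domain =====

-- B replaces A's quadratic pop(0) loop by a closed form over the sorted list (objective: faster).

-- ===== PORT A =====
-- the while loop: pop(0) from the sorted list, add the seek distance, append to the sequence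
def sptfLoop (sorted_requests : List Int) (total_seek_time current_track : Int)
    (track_sequence : List Int) : Int × List Int :=
  match sorted_requests with
  | [] => (total_seek_time, track_sequence)
  | next_request :: rest =>
      sptfLoop rest (total_seek_time + |next_request - current_track|) next_request
        (track_sequence ++ [next_request])

def sptf (current_position : Int) (requests : List Int) : Int × List Int :=
  sptfLoop (PySem.List.sorted requests (fun x => x) false) 0 current_position [current_position]

-- ===== PORT B =====
def sptf_alt (current_position : Int) (requests : List Int) : Int × List Int :=
  let s := PySem.List.sorted requests (fun x => x) false
  match s with
  | [] => (0, [current_position])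
  | h :: t =>
      -- s[0] is h; s[-1] on the nonempty list is its last element (exact here)
      (|h - current_position| + ((h :: t).getLast (by simp) - h), current_position :: h :: t)

-- ===== PRECONDITION & SPEC =====
def Spec_sptf (current_position : Int) (requests : List Int) (out : Int × List Int) : Prop := out = sptf_alt current_position requests
instance (current_position : Int) (requests : List Int) (out : Int × List Int) : Decidable (Spec_sptf current_position requests out) := by unfold Spec_sptf; infer_instance

-- ===== CLAIM (what is proved, stated in full; the proofs are below) =====
def Claim_equal_sptf : Prop := ∀ (current_position : Int) (requests : List Int), Dom_sptf current_position requests → Spec_sptf current_position requests (sptf current_position requests)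

-- ===== LEMMAS AND PROOFS =====

-- the seek-distance sum A's loop accumulates
def seekSum (cur : Int) : List Int → Int
  | [] => 0
  | x :: r => |x - cur| + seekSum x r

lemma sptfLoop_eq (s : List Int) : ∀ (total cur : Int) (seq : List Int),
    sptfLoop s total cur seq = (total + seekSum cur s, seq ++ s) := by
  induction s with
  | nil => intro total cur seq; simp [sptfLoop, seekSum]
  | cons x r ih =>
      intro total cur seq
      simp [sptfLoop, seekSum, ih, add_assoc]

-- telescoping on an ascending chain starting at h
lemma seekSum_chain (t : List Int) : ∀ h : Int, (h :: t).Pairwise (· ≤ ·) →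
    seekSum h t = (h :: t).getLast (by simp) - h := by
  induction t with
  | nil => intro h _; simp [seekSum]
  | cons x r ih =>
      intro h hp
      have hx : h ≤ x := (List.pairwise_cons.mp hp).1 x (by simp)
      have hp' : (x :: r).Pairwise (· ≤ ·) := (List.pairwise_cons.mp hp).2
      have habs : |x - h| = x - h := abs_of_nonneg (by omega)
      have hlast : (h :: x :: r).getLast (by simp) = (x :: r).getLast (by simp) :=
        List.getLast_cons (by simp)
      rw [seekSum, ih x hp', habs, hlast]
      ring

theorem sptf_eq_alt (current_position : Int) (requests : List Int) :
    sptf current_position requests = sptf_alt current_position requests := by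
  unfold sptf sptf_alt
  cases hs : PySem.List.sorted requests (fun x => x) false with
  | nil => simp [sptfLoop]
  | cons h t =>
      have hp : (h :: t).Pairwise (· ≤ ·) := by
        have := PySem.List.sorted_pairwise requests (fun x => x)
        rw [hs] at this
        simpa using this
      rw [sptfLoop_eq]
      simp [seekSum, seekSum_chain t h hp]

-- ===== VERDICT (by name: the statement is the Claim_ definition above) =====
theorem sptf_spec : Claim_equal_sptf := by
  intro current_position requests _
  exact sptf_eq_alt current_position requests
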